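-- pv_equiv track=rewrite | github.com/yu-hui-lin/OTOAlyzer | otoa_caller.py | find_true_gene_region
-- ===== SOURCE A (Python) =====
-- from typing import Dict, List, Tuple, Optional, Any
--
-- def find_true_gene_region(region_dic: Dict) -> Optional[Dict]:
--     """
--     Find the true gene region from the BED file regions.
--
--     Looks for region names containing 'OTOA_unique', 'OTOA_full', 'true', or 'OTOA'.
--
--     Args:
--         region_dic: Dictionary of regions from BED file
--
--     Returns:
--         Region dict or None
--     """
--     # Priority order for finding true gene region
--     priority_patterns = [
--         'OTOA_unique',      # Best - unique to true gene
--         'OTOA_full',        # Full OTOA region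
--         'true_gene',        # Explicit true gene
--         'true',             # Contains 'true'
--         'OTOA',             # Just OTOA
--     ]
--
--     for pattern in priority_patterns:
--         for name, region in region_dic.items():
--             if pattern.lower() in name.lower():
--                 return region
--
--     return None
-- ===== SOURCE B (Python) =====
-- from typing import Dict, Optional
--
-- def find_true_gene_region(region_dic: Dict) -> Optional[Dict]:
--     """Single pass over the regions, tracking the best (lowest) priority index seen."""
--     priority_patterns = [
--         'OTOA_unique',
--         'OTOA_full',
--         'true_gene',
--         'true',
--         'OTOA',
--     ]
--     best_index = len(priority_patterns)
--     best_region = None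
--     for name, region in region_dic.items():
--         low = name.lower()
--         for i, pattern in enumerate(priority_patterns):
--             if pattern.lower() in low:
--                 if i < best_index:
--                     best_index = i
--                     best_region = region
--                 break
--     return best_region
-- ===== Notes on version B (the rewrite author's own statement) =====
-- stated objective: alternative
-- what changed: Inverted the nesting: instead of scanning the whole dict once per priority pattern, B makes a single pass over the dict, computing each name's first matching pattern index and keeping the first name with the strictly smallest index.
import Mathlib
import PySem

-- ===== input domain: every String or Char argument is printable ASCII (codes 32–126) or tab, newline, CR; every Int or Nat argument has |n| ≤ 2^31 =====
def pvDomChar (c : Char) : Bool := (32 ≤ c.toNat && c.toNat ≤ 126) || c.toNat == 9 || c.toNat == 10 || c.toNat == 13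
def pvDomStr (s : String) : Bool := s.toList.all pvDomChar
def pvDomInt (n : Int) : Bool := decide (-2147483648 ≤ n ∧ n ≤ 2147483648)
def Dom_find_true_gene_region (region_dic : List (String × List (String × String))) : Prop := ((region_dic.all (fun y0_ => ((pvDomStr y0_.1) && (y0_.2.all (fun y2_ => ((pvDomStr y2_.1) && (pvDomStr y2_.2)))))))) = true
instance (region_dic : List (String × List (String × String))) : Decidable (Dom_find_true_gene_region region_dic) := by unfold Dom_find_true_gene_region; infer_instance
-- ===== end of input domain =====

-- B inverts A's nesting: one pass over the dict keeping the first name with the smallest matching-pattern index (alternative decomposition, same cost).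

-- ===== PORT A =====
def pvPatterns : List String :=
  ["OTOA_unique", "OTOA_full", "true_gene", "true", "OTOA"]

-- inner loop of A: scan region_dic for the first name containing pattern (both lowercased)
def pvInnerA (pattern : String) :
    List (String × List (String × String)) → Option (List (String × String))
  | [] => none
  | (name, region) :: rest =>
    if PySem.Str.isIn (PySem.Str.lower pattern) (PySem.Str.lower name) then some region
    else pvInnerA pattern rest

-- outer loop of A over the priority patterns
def pvOuterA (ps : List String) (region_dic : List (String × List (String × String))) :
    Option (List (String × String)) :=
  match ps with
  | [] => none
  | p :: rest =>
    match pvInnerA p region_dic with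
    | some r => some r
    | none => pvOuterA rest region_dic

def find_true_gene_region (region_dic : List (String × List (String × String))) :
    Option (List (String × String)) :=
  pvOuterA pvPatterns region_dic

-- ===== PORT B =====
-- B's inner loop: index (counting from k) of the first pattern contained in low; k + ps.length if none
def pvMatchIdx (ps : List String) (k : Nat) (low : String) : Nat :=
  match ps with
  | [] => k
  | p :: rest =>
    if PySem.Str.isIn (PySem.Str.lower p) low then k else pvMatchIdx rest (k + 1) low

-- B's single pass: fold over the dict keeping (best_index, best_region), strict-less update
def pvStepB (ps : List String) (st : Nat × Option (List (String × String)))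
    (nr : String × List (String × String)) : Nat × Option (List (String × String)) :=
  let i := pvMatchIdx ps 0 (PySem.Str.lower nr.1)
  if i < st.1 then (i, some nr.2) else st

def find_true_gene_region_alt (region_dic : List (String × List (String × String))) :
    Option (List (String × String)) :=
  (region_dic.foldl (pvStepB pvPatterns) (pvPatterns.length, none)).2

-- ===== PRECONDITION & SPEC =====
def Spec_find_true_gene_region (region_dic : List (String × List (String × String))) (out : Option (List (String × String))) : Prop := out = find_true_gene_region_alt region_dic
instance (region_dic : List (String × List (String × String))) (out : Option (List (String × String))) : Decidable (Spec_find_true_gene_region region_dic out) := by unfold Spec_find_true_gene_region; infer_instance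

-- ===== CLAIM (what is proved, stated in full; the proofs are below) =====
def Claim_equal_find_true_gene_region : Prop := ∀ (region_dic : List (String × List (String × String))), Dom_find_true_gene_region region_dic → Spec_find_true_gene_region region_dic (find_true_gene_region region_dic)

-- ===== LEMMAS AND PROOFS =====

-- once best_index is 0, the fold never updates
theorem pvFold_zero (ps : List String) (v : Option (List (String × String))) :
    ∀ d : List (String × List (String × String)),
      d.foldl (pvStepB ps) (0, v) = (0, v) := by
  intro d
  induction d with
  | nil => rfl
  | cons nr t ih =>
    simp only [List.foldl_cons, pvStepB, Nat.not_lt_zero, if_false]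
    exact ih

-- accumulator shift for pvMatchIdx
theorem pvMatchIdx_succ (ps : List String) :
    ∀ (k : Nat) (low : String), pvMatchIdx ps (k + 1) low = pvMatchIdx ps k low + 1 := by
  induction ps with
  | nil => intro k low; rfl
  | cons p rest ih =>
    intro k low
    by_cases hm : PySem.Chars.isIn (PySem.Chars.lower p.toList) low.toList = true
    · simp [pvMatchIdx, hm]
    · simp [pvMatchIdx, hm, ih]

theorem pvMatchIdx_pos (ps : List String) :
    ∀ (k : Nat) (low : String), 0 < k → 0 < pvMatchIdx ps k low := by
  induction ps with
  | nil => intro k low hk; simpa [pvMatchIdx] using hk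
  | cons p rest ih =>
    intro k low hk
    by_cases hm : PySem.Chars.isIn (PySem.Chars.lower p.toList) low.toList = true
    · simpa [pvMatchIdx, hm] using hk
    · simp only [pvMatchIdx]
      rw [if_neg (by simpa using hm)]
      exact ih (k + 1) low (by omega)

-- if A's inner scan for the head pattern finds r, B's fold (with positive best_index) returns r
theorem pvFold_some (p : String) (ps : List String) :
    ∀ (d : List (String × List (String × String))) (b : Nat)
      (v : Option (List (String × String))) (r : List (String × String)),
      0 < b → pvInnerA p d = some r →
      (d.foldl (pvStepB (p :: ps)) (b, v)).2 = some r := by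
  intro d
  induction d with
  | nil => intro b v r _ h; simp [pvInnerA] at h
  | cons nr t ih =>
    intro b v r hb h
    by_cases hm :
        PySem.Chars.isIn (PySem.Chars.lower p.toList) (PySem.Chars.lower nr.1.toList) = true
    · have h' : r = nr.2 := by
        simp only [pvInnerA] at h
        rw [if_pos (by simpa using hm)] at h
        exact (Option.some.inj h).symm
      subst h'
      have hstep : pvStepB (p :: ps) (b, v) nr = (0, some nr.2) := by
        simp [pvStepB, pvMatchIdx, hm, hb]
      simp only [List.foldl_cons, hstep, pvFold_zero]
    · have h' : pvInnerA p t = some r := by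
        simp only [pvInnerA] at h
        rwa [if_neg (by simpa using hm)] at h
      have hidx : pvMatchIdx (p :: ps) 0 (PySem.Str.lower nr.1)
          = pvMatchIdx ps 1 (PySem.Str.lower nr.1) := by
        simp only [pvMatchIdx]
        rw [if_neg (by simpa using hm)]
      simp only [List.foldl_cons]
      by_cases hlt : pvMatchIdx (p :: ps) 0 (PySem.Str.lower nr.1) < b
      · have hstep : pvStepB (p :: ps) (b, v) nr
            = (pvMatchIdx (p :: ps) 0 (PySem.Str.lower nr.1), some nr.2) := by
          simp [pvStepB, hlt]
        rw [hstep]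
        refine ih _ _ r ?_ h'
        rw [hidx]
        exact pvMatchIdx_pos ps 1 _ (by omega)
      · have hstep : pvStepB (p :: ps) (b, v) nr = (b, v) := by
          simp [pvStepB, hlt]
        rw [hstep]
        exact ih b v r hb h'

-- if no name matches the head pattern, dropping that pattern shifts the fold state down by one
theorem pvFold_shift (p : String) (ps : List String) :
    ∀ (d : List (String × List (String × String))),
      pvInnerA p d = none →
      ∀ (b : Nat) (v : Option (List (String × String))),
        (d.foldl (pvStepB (p :: ps)) (b + 1, v)).2 = (d.foldl (pvStepB ps) (b, v)).2 := by
  intro d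
  induction d with
  | nil => intro _ b v; rfl
  | cons nr t ih =>
    intro h b v
    by_cases hm :
        PySem.Chars.isIn (PySem.Chars.lower p.toList) (PySem.Chars.lower nr.1.toList) = true
    · exfalso
      simp only [pvInnerA] at h
      rw [if_pos (by simpa using hm)] at h
      exact Option.some_ne_none _ h
    · have h' : pvInnerA p t = none := by
        simp only [pvInnerA] at h
        rwa [if_neg (by simpa using hm)] at h
      have hidx : pvMatchIdx (p :: ps) 0 (PySem.Str.lower nr.1)
          = pvMatchIdx ps 0 (PySem.Str.lower nr.1) + 1 := by
        simp only [pvMatchIdx]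
        rw [if_neg (by simpa using hm)]
        exact pvMatchIdx_succ ps 0 _
      simp only [List.foldl_cons, pvStepB, hidx]
      by_cases hlt : pvMatchIdx ps 0 (PySem.Str.lower nr.1) < b
      · rw [if_pos (by omega : pvMatchIdx ps 0 (PySem.Str.lower nr.1) + 1 < b + 1),
          if_pos hlt]
        exact ih h' _ _
      · rw [if_neg (by omega : ¬ pvMatchIdx ps 0 (PySem.Str.lower nr.1) + 1 < b + 1),
          if_neg hlt]
        exact ih h' b v

-- the generalized equivalence, over an arbitrary pattern list
theorem pvMain (ps : List String) :
    ∀ (d : List (String × List (String × String))),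
      pvOuterA ps d = (d.foldl (pvStepB ps) (ps.length, none)).2 := by
  induction ps with
  | nil =>
    intro d
    simp only [pvOuterA, List.length_nil]
    rw [pvFold_zero]
  | cons p rest ih =>
    intro d
    simp only [pvOuterA]
    cases h : pvInnerA p d with
    | some r =>
      simp only [List.length_cons]
      rw [pvFold_some p rest d (rest.length + 1) none r (by omega) h]
    | none =>
      simp only [List.length_cons]
      rw [pvFold_shift p rest d h rest.length none]
      exact ih d

-- ===== VERDICT (by name: the statement is the Claim_ definition above) =====
theorem find_true_gene_region_spec : Claim_equal_find_true_gene_region := by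
  intro d _
  show find_true_gene_region d = find_true_gene_region_alt d
  exact pvMain pvPatterns d
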